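-- pv_equiv track=rewrite | github.com/rsb-23/vobjectx | vobjectx/icalendar.py | string_to_text_values
-- ===== SOURCE A (Python) =====
-- ESCAPABLE_CHAR_LIST = '\\;,Nn"'
--
-- def string_to_text_values(s, list_separator=",", char_list=None):
--     """
--     Returns list of strings.
--     """
--     if char_list is None:
--         char_list = ESCAPABLE_CHAR_LIST
--
--     def escaped_char(ch: str) -> str:
--         if ch not in char_list:
--             # leave unrecognized escaped characters for later passes
--             return "\\" + ch
--         return "\n" if ch in "nN" else ch
--
--     current = []
--     results = []
--     to_escape = False
--     for char in s:
--         if to_escape: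
--             current.append(escaped_char(char))
--             to_escape = False
--             continue
--
--         if char == "\\":
--             to_escape = True
--         elif char == list_separator:
--             current = "".join(current)
--             results.append(current)
--             current = []
--         else:
--             current.append(char)
--
--     if current or not results:
--         current = "".join(current)
--         results.append(current)
--     return results
-- ===== SOURCE B (Python) =====
-- ESCAPABLE_CHAR_LIST = '\\;,Nn"'
--
--
-- def string_to_text_values(s, list_separator=",", char_list=None):
--     """Two-phase: split into raw segments at unescaped separators, then unescape each."""
--     if char_list is None:
--         char_list = ESCAPABLE_CHAR_LIST
--
--     def escaped_char(ch):
--         if ch not in char_list: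
--             return "\\" + ch
--         return "\n" if ch in "nN" else ch
--
--     def unescape(seg):
--         out = []
--         esc = False
--         for ch in seg:
--             if esc:
--                 out.append(escaped_char(ch))
--                 esc = False
--             elif ch == "\\":
--                 esc = True
--             else:
--                 out.append(ch)
--         return "".join(out)
--
--     # phase 1: cut at separators that are not shielded by a backslash
--     segments = [[]]
--     esc = False
--     for ch in s:
--         if esc:
--             segments[-1].append(ch)
--             esc = False
--         elif ch == "\\":
--             segments[-1].append(ch)
--             esc = True
--         elif ch == list_separator:
--             segments.append([])
--         else:
--             segments[-1].append(ch)
--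
--     # phase 2: unescape every raw segment
--     values = [unescape(seg) for seg in segments]
--
--     # the final segment is kept only if it is non-empty or stands alone
--     if len(values) > 1 and values[-1] == "":
--         values.pop()
--     return values
-- ===== Notes on version B (the rewrite author's own statement) =====
-- stated objective: alternative
-- what changed: A unescapes on the fly in one fused scanner with a conditional final flush; B first splits the string into raw segments at unescaped separators, then maps a separate unescape helper over every segment and drops the final segment iff it unescapes to empty and is not alone.
import Mathlib
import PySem

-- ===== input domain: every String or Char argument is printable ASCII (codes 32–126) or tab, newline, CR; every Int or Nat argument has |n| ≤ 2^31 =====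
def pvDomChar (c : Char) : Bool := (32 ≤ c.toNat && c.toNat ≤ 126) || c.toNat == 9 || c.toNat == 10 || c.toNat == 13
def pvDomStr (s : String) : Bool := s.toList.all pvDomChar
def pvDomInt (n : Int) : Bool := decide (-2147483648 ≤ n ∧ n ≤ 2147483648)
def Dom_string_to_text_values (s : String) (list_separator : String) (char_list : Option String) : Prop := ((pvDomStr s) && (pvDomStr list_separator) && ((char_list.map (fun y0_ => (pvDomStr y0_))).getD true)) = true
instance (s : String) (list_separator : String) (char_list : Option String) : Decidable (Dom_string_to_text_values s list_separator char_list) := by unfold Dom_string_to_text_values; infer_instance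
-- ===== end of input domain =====

-- B replaces A's fused scan-and-unescape loop by a two-phase decomposition (split into raw
-- segments at unescaped separators, then map a standalone unescape helper); same cost, clearer.


def ESCAPABLE_CHAR_LIST : String := "\\;,Nn\""

-- ===== PORT A =====
-- escaped_char (A's inner helper); `ch in char_list` is a substring test, exact here since ch is one char
def escapedCharA (char_list : String) (ch : Char) : String :=
  if ¬ (PySem.Str.isIn (String.singleton ch) char_list = true) then
    "\\" ++ String.singleton ch
  else if PySem.Str.isIn (String.singleton ch) "nN" = true then "\n"
  else String.singleton ch

def string_to_text_values (s : String) (list_separator : String) (char_list : Option String) : List String :=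
  let cl := char_list.getD ESCAPABLE_CHAR_LIST
  let st := s.toList.foldl
    (fun (st : List String × List String × Bool) char =>
      let (current, results, to_escape) := st
      if to_escape then (current ++ [escapedCharA cl char], results, false)
      else if char = '\\' then (current, results, true)
      else if String.singleton char = list_separator then
        ([], results ++ [PySem.Str.join "" current], false)
      else (current ++ [String.singleton char], results, false))
    ([], [], false)
  let (current, results, _) := st
  if current ≠ [] ∨ results = [] then results ++ [PySem.Str.join "" current] else results

-- ===== PORT B =====
-- escaped_char (B's inner helper, same text as in Source B)
def escapedCharB (char_list : String) (ch : Char) : String :=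
  if ¬ (PySem.Str.isIn (String.singleton ch) char_list = true) then
    "\\" ++ String.singleton ch
  else if PySem.Str.isIn (String.singleton ch) "nN" = true then "\n"
  else String.singleton ch

-- unescape(seg): the escape state machine on a single raw segment
def unescapeB (char_list : String) (seg : List Char) : String :=
  PySem.Str.join ""
    (seg.foldl
      (fun (st : List String × Bool) ch =>
        if st.2 then (st.1 ++ [escapedCharB char_list ch], false)
        else if ch = '\\' then (st.1, true)
        else (st.1 ++ [String.singleton ch], false))
      ([], false)).1

def string_to_text_values_alt (s : String) (list_separator : String) (char_list : Option String) : List String :=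
  let cl := char_list.getD ESCAPABLE_CHAR_LIST
  -- phase 1: cut at separators not shielded by a backslash; segments = done ++ [cur]
  let st := s.toList.foldl
    (fun (st : List (List Char) × List Char × Bool) ch =>
      let (done, cur, esc) := st
      if esc then (done, cur ++ [ch], false)
      else if ch = '\\' then (done, cur ++ [ch], true)
      else if String.singleton ch = list_separator then (done ++ [cur], [], esc)
      else (done, cur ++ [ch], false))
    ([], [], false)
  -- phase 2: unescape every raw segment, then pop a trailing empty value unless it stands alone
  let values := (st.1 ++ [st.2.1]).map (unescapeB cl)
  if 1 < values.length ∧ PySem.List.pyGetD values (-1) "" = "" then values.dropLast else values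

-- ===== PRECONDITION & SPEC =====
def Spec_string_to_text_values (s : String) (list_separator : String) (char_list : Option String) (out : List String) : Prop := out = string_to_text_values_alt s list_separator char_list
instance (s : String) (list_separator : String) (char_list : Option String) (out : List String) : Decidable (Spec_string_to_text_values s list_separator char_list out) := by unfold Spec_string_to_text_values; infer_instance

-- ===== CLAIM (what is proved, stated in full; the proofs are below) =====
def Claim_equal_string_to_text_values : Prop := ∀ (s : String) (list_separator : String) (char_list : Option String), Dom_string_to_text_values s list_separator char_list → Spec_string_to_text_values s list_separator char_list (string_to_text_values s list_separator char_list)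

-- ===== LEMMAS AND PROOFS =====

theorem escapedCharA_eq_B : escapedCharA = escapedCharB := rfl

-- the unescape step machine, abbreviated for the proofs
def ustep (cl : String) (st : List String × Bool) (ch : Char) : List String × Bool :=
  if st.2 then (st.1 ++ [escapedCharB cl ch], false)
  else if ch = '\\' then (st.1, true)
  else (st.1 ++ [String.singleton ch], false)

theorem unescapeB_eq (cl : String) (seg : List Char) :
    unescapeB cl seg = PySem.Str.join "" (seg.foldl (ustep cl) ([], false)).1 := rfl

theorem ustep_shift (cl : String) (seg : List Char) (out : List String) (esc : Bool) :
    seg.foldl (ustep cl) (out, esc)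
      = (out ++ (seg.foldl (ustep cl) ([], esc)).1, (seg.foldl (ustep cl) ([], esc)).2) := by
  induction seg generalizing out esc with
  | nil => simp
  | cons c cs ih =>
    simp only [List.foldl_cons]
    cases esc with
    | true =>
      rw [show ustep cl (out, true) c = (out ++ [escapedCharB cl c], false) from rfl,
          show ustep cl ([], true) c = ([escapedCharB cl c], false) from rfl,
          ih (out ++ [escapedCharB cl c]) false, ih [escapedCharB cl c] false]
      simp
    | false =>
      by_cases hb : c = '\\'
      · subst hb
        rw [show ustep cl (out, false) '\\' = (out, true) by simp [ustep],
            show ustep cl ([], false) '\\' = ([], true) by simp [ustep]]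
        exact ih out true
      · rw [show ustep cl (out, false) c = (out ++ [String.singleton c], false) by
              simp [ustep, hb],
            show ustep cl ([], false) c = ([String.singleton c], false) by
              simp [ustep, hb],
            ih (out ++ [String.singleton c]) false, ih [String.singleton c] false]
        simp

theorem escapedCharB_ne_empty (cl : String) (ch : Char) : escapedCharB cl ch ≠ "" := by
  unfold escapedCharB
  split_ifs <;> simp [String.singleton, String.ext_iff]

theorem ustep_run_ne_empty (cl : String) (seg : List Char) (esc : Bool) :
    ∀ x ∈ (seg.foldl (ustep cl) ([], esc)).1, x ≠ "" := by
  induction seg generalizing esc with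
  | nil => simp
  | cons c cs ih =>
    intro x hx
    simp only [List.foldl_cons] at hx
    by_cases h : esc = true
    · subst h
      rw [show ustep cl ([], true) c = ([escapedCharB cl c], false) from rfl,
          ustep_shift] at hx
      rcases (List.mem_append.mp hx) with h1 | h1
      · simp at h1; subst h1; exact escapedCharB_ne_empty cl c
      · exact ih false x h1
    · replace h : esc = false := by cases esc <;> simp_all
      subst h
      by_cases hb : c = '\\'
      · subst hb
        rw [show ustep cl ([], false) '\\' = ([], true) by simp [ustep]] at hx
        exact ih true x hx
      · rw [show ustep cl ([], false) c = ([String.singleton c], false) by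
              simp [ustep, hb], ustep_shift] at hx
        rcases (List.mem_append.mp hx) with h1 | h1
        · simp at h1; subst h1; simp [String.singleton, String.ext_iff]
        · exact ih false x h1

theorem join_empty_iff (l : List String) (h : ∀ x ∈ l, x ≠ "") :
    PySem.Str.join "" l = "" ↔ l = [] := by
  cases l with
  | nil => simp [PySem.Str.join, PySem.Chars.join_nil]
  | cons a t =>
    simp only [iff_false, reduceCtorEq]
    have ha := h a (by simp)
    intro hj
    apply ha
    have hl := congrArg String.toList hj
    rw [PySem.Str.toList_join] at hl
    have hatl : a.toList = [] := by
      cases t with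
      | nil =>
        rw [show List.map String.toList [a] = [a.toList] from rfl,
            PySem.Chars.join_singleton] at hl
        exact hl
      | cons b t' =>
        rw [show (List.map String.toList (a :: b :: t')) = a.toList :: b.toList :: List.map String.toList t' from rfl,
            PySem.Chars.join_cons_cons] at hl
        simp only [String.toList_empty] at hl
        exact (List.append_eq_nil_iff.mp (by simpa using hl)).1
    exact String.ext_iff.mpr (by simpa using hatl)

-- A's fold step
def astep (cl sep : String) (st : List String × List String × Bool) (char : Char) :
    List String × List String × Bool :=
  if st.2.2 then (st.1 ++ [escapedCharA cl char], st.2.1, false)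
  else if char = '\\' then (st.1, st.2.1, true)
  else if String.singleton char = sep then ([], st.2.1 ++ [PySem.Str.join "" st.1], false)
  else (st.1 ++ [String.singleton char], st.2.1, false)

-- B's phase-1 fold step
def bstep (sep : String) (st : List (List Char) × List Char × Bool) (ch : Char) :
    List (List Char) × List Char × Bool :=
  if st.2.2 then (st.1, st.2.1 ++ [ch], false)
  else if ch = '\\' then (st.1, st.2.1 ++ [ch], true)
  else if String.singleton ch = sep then (st.1 ++ [st.2.1], [], st.2.2)
  else (st.1, st.2.1 ++ [ch], false)

def afinal (st : List String × List String × Bool) : List String :=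
  if st.1 ≠ [] ∨ st.2.1 = [] then st.2.1 ++ [PySem.Str.join "" st.1] else st.2.1

def bfinal (cl : String) (st : List (List Char) × List Char × Bool) : List String :=
  let values := (st.1 ++ [st.2.1]).map (unescapeB cl)
  if 1 < values.length ∧ PySem.List.pyGetD values (-1) "" = "" then values.dropLast else values

theorem string_to_text_values_eq (s sep : String) (cl? : Option String) :
    string_to_text_values s sep cl?
      = afinal (s.toList.foldl (astep (cl?.getD ESCAPABLE_CHAR_LIST) sep) ([], [], false)) := rfl

theorem string_to_text_values_alt_eq (s sep : String) (cl? : Option String) :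
    string_to_text_values_alt s sep cl?
      = bfinal (cl?.getD ESCAPABLE_CHAR_LIST)
          (s.toList.foldl (bstep sep) ([], [], false)) := rfl

-- the main invariant: A's fused loop agrees with B's split loop followed by unescaping,
-- from any pair of related states
theorem main_inv (cl sep : String) (cs : List Char) :
    ∀ (done : List (List Char)) (raw : List Char) (esc : Bool) (cur : List String),
      raw.foldl (ustep cl) ([], false) = (cur, esc) →
      afinal (cs.foldl (astep cl sep) (cur, done.map (unescapeB cl), esc))
        = bfinal cl (cs.foldl (bstep sep) (done, raw, esc)) := by
  induction cs with
  | nil =>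
    intro done raw esc cur h
    simp only [List.foldl_nil, afinal, bfinal]
    have hraw : unescapeB cl raw = PySem.Str.join "" cur := by
      rw [unescapeB_eq, h]
    have hne : ∀ x ∈ cur, x ≠ "" := by
      have := ustep_run_ne_empty cl raw false
      rw [h] at this; exact this
    have hiff := join_empty_iff cur hne
    rw [List.map_append, List.map_singleton, hraw,
        PySem.List.pyGetD_neg_one_append_singleton]
    by_cases hc : cur = []
    · subst hc
      rw [show PySem.Str.join "" ([] : List String) = "" from rfl]
      by_cases hd : done = []
      · subst hd; simp
      · rw [if_neg (by simp [hd]), if_pos ?_]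
        · simp
        · exact ⟨by have := List.length_pos_iff.mpr hd; simp; omega, rfl⟩
    · have hjoin : PySem.Str.join "" cur ≠ "" := fun hh => hc (hiff.mp hh)
      rw [if_pos (Or.inl hc), if_neg (by rintro ⟨_, h2⟩; exact hjoin h2)]
  | cons c cs ih =>
    intro done raw esc cur h
    simp only [List.foldl_cons]
    by_cases he : esc = true
    · subst he
      rw [show astep cl sep (cur, done.map (unescapeB cl), true) c
            = (cur ++ [escapedCharA cl c], done.map (unescapeB cl), false) from rfl,
          show bstep sep (done, raw, true) c = (done, raw ++ [c], false) from rfl]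
      apply ih done (raw ++ [c]) false (cur ++ [escapedCharA cl c])
      rw [List.foldl_append, h]
      simp [ustep, escapedCharA_eq_B]
    · replace he : esc = false := by cases esc <;> simp_all
      subst he
      by_cases hb : c = '\\'
      · subst hb
        rw [show astep cl sep (cur, done.map (unescapeB cl), false) '\\'
              = (cur, done.map (unescapeB cl), true) by simp [astep],
            show bstep sep (done, raw, false) '\\' = (done, raw ++ ['\\'], true) by
              simp [bstep]]
        apply ih done (raw ++ ['\\']) true cur
        rw [List.foldl_append, h]; simp [ustep]
      · by_cases hs : String.singleton c = sep
        · rw [show astep cl sep (cur, done.map (unescapeB cl), false) c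
                = ([], done.map (unescapeB cl) ++ [PySem.Str.join "" cur], false) by
                simp [astep, hb, hs],
              show bstep sep (done, raw, false) c = (done ++ [raw], [], false) by
                simp [bstep, hb, hs]]
          have hraw : unescapeB cl raw = PySem.Str.join "" cur := by
            rw [unescapeB_eq, h]
          have := ih (done ++ [raw]) [] false []
            (by simp)
          rw [List.map_append, List.map_singleton, hraw] at this
          exact this
        · rw [show astep cl sep (cur, done.map (unescapeB cl), false) c
                = (cur ++ [String.singleton c], done.map (unescapeB cl), false) by
                simp [astep, hb, hs],
              show bstep sep (done, raw, false) c = (done, raw ++ [c], false) by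
                simp [bstep, hb, hs]]
          apply ih done (raw ++ [c]) false (cur ++ [String.singleton c])
          rw [List.foldl_append, h]; simp [ustep, hb]

-- ===== VERDICT (by name: the statement is the Claim_ definition above) =====
theorem string_to_text_values_spec : Claim_equal_string_to_text_values := by
  intro s sep cl? _
  unfold Spec_string_to_text_values
  rw [string_to_text_values_eq, string_to_text_values_alt_eq]
  exact main_inv _ sep s.toList [] [] false [] (by simp)
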